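-- pv_equiv track=rewrite | github.com/SciFit-Sync/scifit-sync | mlops/pipeline/crawler.py | _round_robin_dedup
-- ===== SOURCE A (Python) =====
-- from collections import defaultdict
--
-- def _round_robin_dedup(
--     per_category: list[tuple[str, list[str]]],
--     existing: set[str],
--     max_total: int,
-- ) -> tuple[list[str], dict[str, set[str]]]:
--     """카테고리별 PMID 리스트를 round-robin으로 dedup하며 cap까지 누적한다.
--
--     각 round에서 카테고리를 한 바퀴 돌며 그 round 위치의 PMID를 하나씩 가져온다.
--     단순 FIFO cap(앞쪽 카테고리가 cap을 모두 채우는 방식)이 카테고리 다양성을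
--     무너뜨리는 문제를 해결한다.
--
--     동작 규칙:
--       - 동일 PMID가 여러 카테고리에 매칭되면 카테고리 메타를 합집합으로 누적한다.
--       - cap 도달 후에도 기존 PMID에 대한 카테고리 메타 추가는 계속된다 (신규 PMID만 거부).
--       - existing 집합의 PMID는 어떤 경우에도 제외한다.
--
--     Args:
--         per_category: (카테고리명, 해당 카테고리에서 검색된 PMID 리스트) 튜플들.
--         existing: 이미 수집된 PMID 집합 (중복 방지).
--         max_total: 신규 PMID 누적 상한.
--
--     Returns:
--         (PMID 추가 순서 리스트, PMID → 카테고리명 set 매핑) 튜플.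
--     """
--     pmid_to_categories: dict[str, set[str]] = defaultdict(set)
--     pmid_order: list[str] = []
--
--     max_len = max((len(pmids) for _, pmids in per_category), default=0)
--     for i in range(max_len):
--         for name, pmids in per_category:
--             if i >= len(pmids):
--                 continue
--             pmid = pmids[i]
--             if pmid in existing:
--                 continue
--             if pmid in pmid_to_categories:
--                 pmid_to_categories[pmid].add(name)
--                 continue
--             if len(pmid_to_categories) >= max_total:
--                 continue
--             pmid_order.append(pmid)
--             pmid_to_categories[pmid].add(name)
--
--     return pmid_order, dict(pmid_to_categories)
-- ===== SOURCE B (Python) =====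
-- def _round_robin_dedup(
--     per_category: list[tuple[str, list[str]]],
--     existing: set[str],
--     max_total: int,
-- ) -> tuple[list[str], dict[str, set[str]]]:
--     """Sort-then-scan: flatten every occurrence into a rank-keyed event
--     (rank = round * number_of_categories + category position, i.e. round-robin
--     schedule order), sort the events once by rank, then resolve them in two
--     separate linear passes: pass 1 picks the accepted PMIDs (first max_total
--     distinct ones not in `existing`), pass 2 collects the category sets."""
--     width = len(per_category)
--     events = sorted(
--         ((i * width + c, name, pmid)
--          for c, (name, pmids) in enumerate(per_category)
--          for i, pmid in enumerate(pmids)),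
--         key=lambda e: e[0],
--     )
--     order: list[str] = []
--     seen: set[str] = set()
--     for _, _, pmid in events:
--         if pmid not in existing and pmid not in seen:
--             seen.add(pmid)
--             if len(order) < max_total:
--                 order.append(pmid)
--     accepted = set(order)
--     cats: dict[str, set[str]] = {p: set() for p in order}
--     for _, name, pmid in events:
--         if pmid in accepted:
--             cats[pmid].add(name)
--     return order, cats
-- ===== Notes on version B (the rewrite author's own statement) =====
-- stated objective: alternative
-- what changed: A interleaves selection and dict-building inside nested per-round rescans of every category; B flattens all occurrences into rank-keyed events (rank = round*width + category position), sorts them once into round-robin schedule order, and then resolves the result in two separate linear passes: pass 1 picks the accepted PMID order, pass 2 collects the category sets for the accepted PMIDs.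
import Mathlib
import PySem

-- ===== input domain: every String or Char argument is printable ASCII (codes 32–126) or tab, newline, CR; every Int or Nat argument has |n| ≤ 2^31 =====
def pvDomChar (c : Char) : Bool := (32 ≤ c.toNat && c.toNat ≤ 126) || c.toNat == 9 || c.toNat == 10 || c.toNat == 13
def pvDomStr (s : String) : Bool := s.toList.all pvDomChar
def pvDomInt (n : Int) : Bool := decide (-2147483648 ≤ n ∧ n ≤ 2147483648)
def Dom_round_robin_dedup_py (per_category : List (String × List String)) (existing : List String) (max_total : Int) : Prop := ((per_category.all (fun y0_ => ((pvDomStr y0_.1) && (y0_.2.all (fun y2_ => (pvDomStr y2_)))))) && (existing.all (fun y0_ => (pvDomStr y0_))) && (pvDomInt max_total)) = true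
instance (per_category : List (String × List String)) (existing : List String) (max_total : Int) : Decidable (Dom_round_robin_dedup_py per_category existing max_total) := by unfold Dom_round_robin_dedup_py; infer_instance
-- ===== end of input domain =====

-- B replaces A's nested per-round rescans (with an interleaved dict build) by sort-then-scan:
-- flatten all occurrences into rank-keyed events, sort once, then two separate linear passes
-- (pick accepted PMIDs, then collect category sets); same results, a different algorithm.


-- ===== PORT A =====
-- the body of A's inner loop for one (name, pmid) occurrence: skip if in `existing`;
-- union the category into an existing entry; otherwise, below the cap, append the PMID
def pvProc (existing : List String) (max_total : Int)
    (st : List String × PySem.Dict String (PySem.Set String)) (name pmid : String) :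
    List String × PySem.Dict String (PySem.Set String) :=
  if pmid ∈ existing then st
  else
    match st.2.get? pmid with
    | some s => (st.1, st.2.insert pmid (PySem.Set.add s name))
    | none =>
      if (st.2.size : Int) ≥ max_total then st
      else (st.1 ++ [pmid], st.2.insert pmid (PySem.Set.add PySem.Set.empty name))

def round_robin_dedup_py (per_category : List (String × List String)) (existing : List String) (max_total : Int) : List String × (List (String × List String)) :=
  -- max((len(pmids) for _, pmids in per_category), default=0)
  let max_len := per_category.foldl (fun m c => Nat.max m c.2.length) 0
  let st := (List.range max_len).foldl
    (fun st i =>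
      per_category.foldl
        (fun st c =>
          match c.2[i]? with          -- `if i >= len(pmids): continue; pmid = pmids[i]`
          | none => st
          | some pmid => pvProc existing max_total st c.1 pmid)
        st)
    (([], PySem.Dict.empty) : List String × PySem.Dict String (PySem.Set String))
  (st.1, st.2.items)

-- ===== PORT B =====
-- Source B's generator: every occurrence as the event (i * width + c, name, pmid); then sorted by rank
def pvEvRaw (pc : List (String × List String)) : List (Int × String × String) :=
  (PySem.List.enumerate pc 0).flatMap (fun ce =>
    (PySem.List.enumerate ce.2.2 0).map (fun ip => (ip.1 * (pc.length : Int) + ce.1, ce.2.1, ip.2)))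

def pvEvents (pc : List (String × List String)) : List (Int × String × String) :=
  PySem.List.sorted (pvEvRaw pc) (fun e => e.1)

-- pass 1 body: collect the accepted order and the set of pmids already decided on
def pvPick (existing : List String) (max_total : Int)
    (st : List String × PySem.Set String) (e : Int × String × String) :
    List String × PySem.Set String :=
  if e.2.2 ∈ existing ∨ e.2.2 ∈ st.2 then st
  else ((if (st.1.length : Int) < max_total then st.1 ++ [e.2.2] else st.1),
        PySem.Set.add st.2 e.2.2)

-- pass 2 body: `if pmid in accepted: cats[pmid].add(name)` (the key is always present:
-- accepted = set(order) and cats was initialised with exactly the keys of order)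
def pvCollect (accepted : PySem.Set String)
    (d : PySem.Dict String (PySem.Set String)) (e : Int × String × String) :
    PySem.Dict String (PySem.Set String) :=
  if PySem.Set.contains accepted e.2.2 then
    d.insert e.2.2 (PySem.Set.add (d.getD e.2.2 PySem.Set.empty) e.2.1)
  else d

def round_robin_dedup_py_alt (per_category : List (String × List String)) (existing : List String) (max_total : Int) : List String × (List (String × List String)) :=
  let events := pvEvents per_category
  let order := (events.foldl (pvPick existing max_total) ([], PySem.Set.empty)).1
  let accepted := PySem.Set.ofList order
  let cats := events.foldl (pvCollect accepted)
      (order.foldl (fun d p => d.insert p PySem.Set.empty) PySem.Dict.empty)  -- {p: set() for p in order}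
  (order, cats.items)

-- ===== PRECONDITION & SPEC =====
def Spec_round_robin_dedup_py (per_category : List (String × List String)) (existing : List String) (max_total : Int) (out : List String × (List (String × List String))) : Prop := out = round_robin_dedup_py_alt per_category existing max_total
instance (per_category : List (String × List String)) (existing : List String) (max_total : Int) (out : List String × (List (String × List String))) : Decidable (Spec_round_robin_dedup_py per_category existing max_total out) := by unfold Spec_round_robin_dedup_py; infer_instance

-- ===== CLAIM (what is proved, stated in full; the proofs are below) =====
def Claim_equal_round_robin_dedup_py : Prop := ∀ (per_category : List (String × List String)) (existing : List String) (max_total : Int), Dom_round_robin_dedup_py per_category existing max_total → Spec_round_robin_dedup_py per_category existing max_total (round_robin_dedup_py per_category existing max_total)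

-- ===== LEMMAS AND PROOFS =====

-- A's inner-loop body applied to one flattened event (the rank is ignored)
def pvProcEv (ex : List String) (mt : Int)
    (st : List String × PySem.Dict String (PySem.Set String)) (e : Int × String × String) :
    List String × PySem.Dict String (PySem.Set String) :=
  pvProc ex mt st e.2.1 e.2.2

-- pass-2 body with the accepted pmids as a plain list (∈ instead of Set.contains)
def pvCollectL (acc : List String)
    (d : PySem.Dict String (PySem.Set String)) (e : Int × String × String) :
    PySem.Dict String (PySem.Set String) :=
  if e.2.2 ∈ acc then
    d.insert e.2.2 (PySem.Set.add (d.getD e.2.2 PySem.Set.empty) e.2.1)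
  else d

def pvInits (ps : List String) (d : PySem.Dict String (PySem.Set String)) :
    PySem.Dict String (PySem.Set String) :=
  ps.foldl (fun d p => d.insert p PySem.Set.empty) d

-- the events of round i, in category order
def pvRow (pc : List (String × List String)) (i : Nat) : List (Int × String × String) :=
  (PySem.List.enumerate pc 0).filterMap
    (fun ce => (ce.2.2[i]?).map (fun p => ((i : Int) * (pc.length : Int) + ce.1, ce.2.1, p)))

-- the per-category event columns (Source B's generator, one list per category)
def pvCols (pc : List (String × List String)) : List (List (Int × String × String)) :=
  (PySem.List.enumerate pc 0).map (fun ce =>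
    (PySem.List.enumerate ce.2.2 0).map (fun ip => (ip.1 * (pc.length : Int) + ce.1, ce.2.1, ip.2)))

theorem pvEnum_cons {α : Type} (x : α) (xs : List α) (s : Int) :
    PySem.List.enumerate (x :: xs) s = (s, x) :: PySem.List.enumerate xs (s + 1) := by
  simp [PySem.List.enumerate]

theorem pvEvRaw_eq_flatten (pc : List (String × List String)) :
    pvEvRaw pc = (pvCols pc).flatten := by
  simp [pvEvRaw, pvCols, List.flatMap_def]

theorem pvRow_eq_filterMap (pc : List (String × List String)) (i : Nat) :
    pvRow pc i = (pvCols pc).filterMap (fun col => col[i]?) := by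
  simp only [pvRow, pvCols, List.filterMap_map]
  apply List.filterMap_congr
  intro ce _
  simp only [Function.comp_def, List.getElem?_map, PySem.List.getElem?_enumerate, Option.map_map]
  cases ce.2.2[i]? <;> simp

-- pulling the head of every column to the front is a permutation of the flatten
theorem pvHeads_pull {α : Type} (cols : List (List α)) :
    (cols.filterMap (fun col => col[0]?) ++ (cols.map (fun (col : List α) => col.drop 1)).flatten).Perm
      cols.flatten := by
  induction cols with
  | nil => simp
  | cons cl cs ih =>
    cases cl with
    | nil => simpa using ih
    | cons x t =>
      simp only [List.filterMap_cons, List.getElem?_cons_zero, List.map_cons,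
        List.flatten_cons, List.drop_succ_cons, List.drop_zero, List.cons_append]
      refine List.Perm.cons x ?_
      exact (List.perm_append_comm_assoc _ _ _).trans (List.Perm.append_left t ih)

-- the round-major traversal is a permutation of the column-major flatten
theorem pvTranspose_perm {α : Type} :
    ∀ (n : Nat) (cols : List (List α)), (∀ col ∈ cols, col.length ≤ n) →
      ((List.range n).flatMap (fun i => cols.filterMap (fun col => col[i]?))).Perm
        cols.flatten := by
  intro n
  induction n with
  | zero =>
    intro cols h
    have hnil : cols.flatten = [] := by
      rw [List.flatten_eq_nil_iff]; intro l hl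
      exact List.eq_nil_of_length_eq_zero (Nat.le_zero.mp (h l hl))
    simp [hnil]
  | succ n ih =>
    intro cols h
    rw [List.range_succ_eq_map, List.flatMap_cons, List.flatMap_map]
    have hbody : ∀ i : Nat,
        cols.filterMap (fun col => col[Nat.succ i]?)
          = (cols.map (fun (col : List α) => col.drop 1)).filterMap (fun col => col[i]?) := by
      intro i
      rw [List.filterMap_map]
      apply List.filterMap_congr
      intro col _
      simp
    simp only [hbody]
    have hlen : ∀ col ∈ cols.map (fun (col : List α) => col.drop 1), col.length ≤ n := by
      intro col hc
      obtain ⟨col', hc', rfl⟩ := List.mem_map.mp hc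
      have := h col' hc'
      simp only [List.length_drop]
      omega
    exact (List.Perm.append_left _ (ih (cols.map (fun (col : List α) => col.drop 1)) hlen)).trans
      (pvHeads_pull cols)

-- every event of round i carries a rank in [i*K, (i+1)*K)
theorem pvRow_key_bounds (pc : List (String × List String)) (i : Nat) :
    ∀ e ∈ pvRow pc i,
      (i : Int) * (pc.length : Int) ≤ e.1 ∧ e.1 < ((i : Int) + 1) * (pc.length : Int) := by
  intro e he
  simp only [pvRow, List.mem_filterMap] at he
  obtain ⟨ce, hce, hmap⟩ := he
  cases hidx : ce.2.2[i]? with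
  | none => rw [hidx] at hmap; simp at hmap
  | some p =>
    rw [hidx] at hmap
    simp only [Option.map_some, Option.some.injEq] at hmap
    obtain ⟨k, hk, hcek⟩ := (PySem.List.mem_enumerate_iff _ _ _).mp hce
    have hce1 : ce.1 = (k : Int) := by rw [hcek]; simp
    have h0 : (0 : Int) ≤ ce.1 := by rw [hce1]; positivity
    have h1 : ce.1 < (pc.length : Int) := by rw [hce1]; exact_mod_cast hk
    subst hmap
    dsimp only
    constructor
    · linarith
    · have hexp : ((i : Int) + 1) * (pc.length : Int)
          = (i : Int) * (pc.length : Int) + (pc.length : Int) := by ring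
      rw [hexp]; linarith

theorem pvRoundMajor_pairwise (pc : List (String × List String)) (n : Nat) :
    List.Pairwise (fun a b => a.1 < b.1)
      ((List.range n).flatMap (fun i => pvRow pc i)) := by
  rw [List.flatMap_def, List.pairwise_flatten]
  constructor
  · intro l hl
    obtain ⟨i, _, rfl⟩ := List.mem_map.mp hl
    simp only [pvRow]
    rw [List.pairwise_filterMap]
    refine (PySem.List.pairwise_lt_enumerate pc 0).imp ?_
    intro ce ce' hlt b hb b' hb'
    cases h1 : ce.2.2[i]? with
    | none => rw [h1] at hb; simp at hb
    | some p =>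
      cases h2 : ce'.2.2[i]? with
      | none => rw [h2] at hb'; simp at hb'
      | some p' =>
        rw [h1] at hb; rw [h2] at hb'
        simp only [Option.map_some, Option.some.injEq] at hb hb'
        subst hb; subst hb'
        dsimp only
        linarith
  · rw [List.pairwise_map]
    refine List.pairwise_lt_range.imp ?_
    intro i j hij x hx y hy
    have hxb := pvRow_key_bounds pc i x hx
    have hyb := pvRow_key_bounds pc j y hy
    have hstep : ((i : Int) + 1) * (pc.length : Int) ≤ (j : Int) * (pc.length : Int) := by
      apply mul_le_mul_of_nonneg_right _ (by positivity : (0 : Int) ≤ (pc.length : Int))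
      exact_mod_cast hij
    linarith [hxb.1, hxb.2, hyb.1]

-- every column is at most max_len long
theorem pvCols_length_le (pc : List (String × List String)) :
    ∀ col ∈ pvCols pc, col.length ≤ pc.foldl (fun m c => Nat.max m c.2.length) 0 := by
  intro col hc
  obtain ⟨ce, hce, rfl⟩ := List.mem_map.mp hc
  obtain ⟨k, hk, rfl⟩ := (PySem.List.mem_enumerate_iff _ _ _).mp hce
  simp only [PySem.List.length_enumerate, List.length_map]
  exact (PySem.List.le_foldl_max_nat pc (fun c => c.2.length) 0).2 pc[k] (List.getElem_mem hk)

-- Source B's sorted event list IS the round-major traversal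
theorem pvEvents_eq_roundMajor (pc : List (String × List String)) :
    pvEvents pc
      = (List.range (pc.foldl (fun m c => Nat.max m c.2.length) 0)).flatMap
          (fun i => pvRow pc i) := by
  apply PySem.List.sorted_eq_of_perm_of_pairwise_lt
  · have hrw : (List.range (pc.foldl (fun m c => Nat.max m c.2.length) 0)).flatMap
          (fun i => pvRow pc i)
        = (List.range (pc.foldl (fun m c => Nat.max m c.2.length) 0)).flatMap
            (fun i => (pvCols pc).filterMap (fun col => col[i]?)) := by
      simp only [pvRow_eq_filterMap]
    rw [hrw, pvEvRaw_eq_flatten]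
    exact pvTranspose_perm _ (pvCols pc) (pvCols_length_le pc)
  · exact pvRoundMajor_pairwise pc _

-- A's inner loop over one round is the fold of its body over that round's events
theorem pvRow_foldl (ex : List String) (mt : Int) (i : Nat) (K : Int) :
    ∀ (pc : List (String × List String)) (s : Int)
      (st : List String × PySem.Dict String (PySem.Set String)),
      ((PySem.List.enumerate pc s).filterMap
          (fun ce => (ce.2.2[i]?).map (fun p => ((i : Int) * K + ce.1, ce.2.1, p)))).foldl
        (pvProcEv ex mt) st
      = pc.foldl (fun st c =>
          match c.2[i]? with
          | none => st
          | some pmid => pvProc ex mt st c.1 pmid) st := by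
  intro pc
  induction pc with
  | nil => intro s st; rfl
  | cons c t ih =>
    intro s st
    rw [pvEnum_cons, List.filterMap_cons]
    cases hci : c.2[i]? with
    | none => simp only [Option.map_none, List.foldl_cons, hci]; exact ih (s + 1) st
    | some p =>
      simp only [Option.map_some, List.foldl_cons, hci]
      exact ih (s + 1) _

-- A's double loop, normalised to a single fold over the sorted event list
theorem pvA_eq (pc : List (String × List String)) (ex : List String) (mt : Int) :
    round_robin_dedup_py pc ex mt
      = (((pvEvents pc).foldl (pvProcEv ex mt)
            (([], PySem.Dict.empty) : List String × PySem.Dict String (PySem.Set String))).1,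
         ((pvEvents pc).foldl (pvProcEv ex mt)
            (([], PySem.Dict.empty) : List String × PySem.Dict String (PySem.Set String))).2.items) := by
  simp only [round_robin_dedup_py]
  rw [pvEvents_eq_roundMajor, List.foldl_flatMap]
  have hcongr : ∀ (init : List String × PySem.Dict String (PySem.Set String)),
      (List.range (pc.foldl (fun m c => Nat.max m c.2.length) 0)).foldl
        (fun acc i => (pvRow pc i).foldl (pvProcEv ex mt) acc) init
      = (List.range (pc.foldl (fun m c => Nat.max m c.2.length) 0)).foldl
        (fun st i =>
          pc.foldl (fun st c =>
            match c.2[i]? with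
            | none => st
            | some pmid => pvProc ex mt st c.1 pmid) st) init := by
    intro init
    apply PySem.List.foldl_congr_mem
    intro acc i _
    exact pvRow_foldl ex mt i (pc.length : Int) pc 0 acc
  rw [hcongr]

-- === the coupling between A's single interleaved pass and B's two passes ===

-- shape of pass 1's result: the already-accepted prefix plus fresh, pairwise-distinct pmids
theorem pvPick_shape (ex : List String) (mt : Int) :
    ∀ (es : List (Int × String × String)) (o s : List String),
      ∃ t, (es.foldl (pvPick ex mt) (o, s)).1 = o ++ t ∧ t.Nodup ∧
        ∀ p ∈ t, p ∉ ex ∧ p ∉ s := by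
  intro es
  induction es with
  | nil => intro o s; exact ⟨[], by simp, by simp, by simp⟩
  | cons e es ih =>
    intro o s
    rw [List.foldl_cons]
    by_cases hc : e.2.2 ∈ ex ∨ e.2.2 ∈ s
    · simp only [pvPick, if_pos hc]
      exact ih o s
    · have hc1 : e.2.2 ∉ ex := fun h => hc (Or.inl h)
      have hc2 : e.2.2 ∉ s := fun h => hc (Or.inr h)
      simp only [pvPick, if_neg hc]
      by_cases hlen : ((o.length : Int) < mt)
      · rw [if_pos hlen]
        obtain ⟨t, h1, h2, h3⟩ := ih (o ++ [e.2.2]) (PySem.Set.add s e.2.2)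
        refine ⟨e.2.2 :: t, by simpa [List.append_assoc] using h1, ?_, ?_⟩
        · rw [List.nodup_cons]
          refine ⟨fun hmem => ?_, h2⟩
          exact (h3 _ hmem).2 ((PySem.Set.mem_add s e.2.2 e.2.2).mpr (Or.inr rfl))
        · intro p hp
          rcases List.mem_cons.mp hp with rfl | hp'
          · exact ⟨hc1, hc2⟩
          · have := h3 p hp'
            exact ⟨this.1, fun hmem => this.2 ((PySem.Set.mem_add s e.2.2 p).mpr (Or.inl hmem))⟩
      · rw [if_neg hlen]
        obtain ⟨t, h1, h2, h3⟩ := ih o (PySem.Set.add s e.2.2)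
        refine ⟨t, h1, h2, fun p hp => ?_⟩
        have := h3 p hp
        exact ⟨this.1, fun hmem => this.2 ((PySem.Set.mem_add s e.2.2 p).mpr (Or.inl hmem))⟩

-- the main invariant: A's interleaved fold equals pass 1 followed by pass 2
theorem pvMain (ex : List String) (mt : Int) :
    ∀ (es : List (Int × String × String)) (order seen : List String)
      (d : PySem.Dict String (PySem.Set String)),
      d.keys = order → order.Nodup →
      (∀ p ∈ order, p ∈ seen) → (∀ p ∈ seen, p ∉ ex) →
      (((order.length : Int) < mt) → ∀ p ∈ seen, p ∈ order) →
      es.foldl (pvProcEv ex mt) (order, d)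
        = ((es.foldl (pvPick ex mt) (order, seen)).1,
           es.foldl (pvCollectL ((es.foldl (pvPick ex mt) (order, seen)).1))
             (pvInits (((es.foldl (pvPick ex mt) (order, seen)).1).drop order.length) d)) := by
  intro es
  induction es with
  | nil =>
    intro order seen d hkeys _ _ _ _
    simp [List.drop_length, pvInits]
  | cons e es ih =>
    intro order seen d hkeys hnodup hos hsx hcap
    have hsize : (d.size : Int) = (order.length : Int) := by
      rw [← hkeys]
      simp [PySem.Dict.size, PySem.Dict.keys]
    rw [List.foldl_cons, List.foldl_cons, List.foldl_cons]
    by_cases hPex : e.2.2 ∈ ex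
    · -- pmid in existing: everything skips
      have hst : pvProcEv ex mt (order, d) e = (order, d) := by
        simp [pvProcEv, pvProc, hPex]
      have hpk : pvPick ex mt (order, seen) e = (order, seen) := by
        simp [pvPick, hPex]
      rw [hst, hpk]
      obtain ⟨t, ht, _, htp⟩ := pvPick_shape ex mt es order seen
      have hPnot : e.2.2 ∉ (es.foldl (pvPick ex mt) (order, seen)).1 := by
        rw [ht]
        intro hmem
        rcases List.mem_append.mp hmem with h | h
        · exact (hsx _ (hos _ h)) hPex
        · exact (htp _ h).1 hPex
      rw [show pvCollectL ((es.foldl (pvPick ex mt) (order, seen)).1)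
            (pvInits (((es.foldl (pvPick ex mt) (order, seen)).1).drop order.length) d) e
          = pvInits (((es.foldl (pvPick ex mt) (order, seen)).1).drop order.length) d by
        simp [pvCollectL, hPnot]]
      exact ih order seen d hkeys hnodup hos hsx hcap
    · by_cases hctn : d.contains e.2.2 = true
      · -- pmid already accepted: A unions the name in; B's pass 2 does the same
        have hPo : e.2.2 ∈ order := by
          rw [← hkeys]; exact (PySem.Dict.contains_iff_mem_keys d e.2.2).mp hctn
        have hPseen : e.2.2 ∈ seen := hos _ hPo
        obtain ⟨sv, hsv⟩ : ∃ sv, d.get? e.2.2 = some sv := by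
          cases hg : d.get? e.2.2 with
          | none => rw [(PySem.Dict.get?_eq_none_iff_contains d e.2.2).mp hg] at hctn; cases hctn
          | some sv => exact ⟨sv, rfl⟩
        have hst : pvProcEv ex mt (order, d) e
            = (order, d.insert e.2.2 (PySem.Set.add sv e.2.1)) := by
          simp [pvProcEv, pvProc, hPex, hsv]
        have hpk : pvPick ex mt (order, seen) e = (order, seen) := by
          simp [pvPick, hPseen]
        rw [hst, hpk]
        obtain ⟨t, ht, htn, htp⟩ := pvPick_shape ex mt es order seen
        have htfresh : ∀ p ∈ t, p ∉ order := fun p hp hmem => (htp p hp).2 (hos p hmem)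
        have htcontains : ∀ p ∈ t, d.contains p = false := by
          intro p hp
          cases hcp : d.contains p
          · rfl
          · have : p ∈ d.keys := (PySem.Dict.contains_iff_mem_keys d p).mp hcp
            rw [hkeys] at this
            exact absurd this (htfresh p hp)
        have hdrop : ((es.foldl (pvPick ex mt) (order, seen)).1).drop order.length = t := by
          rw [ht, List.drop_left]
        have hitems : (pvInits t d).items = d.items ++ t.map (fun p => (p, PySem.Set.empty)) := by
          simpa [pvInits] using PySem.Dict.items_foldl_insert_fresh t (fun p => p)
            (fun _ => PySem.Set.empty) d htcontains (by simpa using htn)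
        have hkeys0 : (pvInits t d).keys = order ++ t := by
          simp only [PySem.Dict.keys, hitems, List.map_append, List.map_map]
          rw [show List.map (fun x => x.1) d.items = d.keys from rfl, hkeys]
          simp [Function.comp_def]
        have hkeys0nd : (pvInits t d).keys.Nodup := by
          rw [hkeys0, List.nodup_append]
          exact ⟨hnodup, htn, fun a ha b hb hab => htfresh b hb (hab ▸ ha)⟩
        have hgetD : (pvInits t d).getD e.2.2 PySem.Set.empty = sv := by
          refine PySem.Dict.getD_of_mem_items _ ?_ hkeys0nd _
          rw [hitems]
          exact List.mem_append_left _ (PySem.Dict.mem_items_of_get?_eq_some d hsv)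
        have hPmem : e.2.2 ∈ (es.foldl (pvPick ex mt) (order, seen)).1 := by
          rw [ht]; exact List.mem_append_left _ hPo
        have hcontains0 : (pvInits t d).contains e.2.2 = true := by
          rw [PySem.Dict.contains_iff_mem_keys, hkeys0]
          exact List.mem_append_left _ hPo
        have hcollect : pvCollectL ((es.foldl (pvPick ex mt) (order, seen)).1)
              (pvInits t d) e
            = pvInits t (d.insert e.2.2 (PySem.Set.add sv e.2.1)) := by
          simp only [pvCollectL, if_pos hPmem, hgetD]
          apply PySem.Dict.ext
          rw [PySem.Dict.items_insert_of_contains _ _ hcontains0, hitems, List.map_append]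
          have htmap : (t.map (fun p => (p, PySem.Set.empty))).map
                (fun q => if (q.1 == e.2.2) = true then (e.2.2, PySem.Set.add sv e.2.1) else q)
              = t.map (fun p => (p, PySem.Set.empty)) := by
            rw [List.map_map]
            apply List.map_congr_left
            intro p hp
            have hnp : p ≠ e.2.2 := fun h => htfresh p hp (h ▸ hPo)
            simp [hnp]
          rw [htmap]
          have hfresh' : ∀ p ∈ t,
              (d.insert e.2.2 (PySem.Set.add sv e.2.1)).contains p = false := by
            intro p hp
            rw [PySem.Dict.contains_insert]
            have h1 : (p == e.2.2) = false := by
              rw [beq_eq_false_iff_ne]; intro h; exact htfresh p hp (h ▸ hPo)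
            rw [h1, htcontains p hp]
            rfl
          have hins := PySem.Dict.items_foldl_insert_fresh t (fun p => p)
            (fun _ => PySem.Set.empty)
            (d.insert e.2.2 (PySem.Set.add sv e.2.1)) hfresh' (by simpa using htn)
          simp only [pvInits]
          rw [hins, PySem.Dict.items_insert_of_contains _ _ hctn]
        rw [hdrop, hcollect]
        have hkeys' : (d.insert e.2.2 (PySem.Set.add sv e.2.1)).keys = order := by
          rw [PySem.Dict.keys_insert_of_contains _ _ hctn, hkeys]
        rw [ih order seen (d.insert e.2.2 (PySem.Set.add sv e.2.1)) hkeys' hnodup hos hsx hcap,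
          hdrop]
      · -- pmid not yet in the dict
        have hctnf : d.contains e.2.2 = false := by
          cases hcp : d.contains e.2.2
          · rfl
          · exact absurd hcp hctn
        have hPnoto : e.2.2 ∉ order := by
          rw [← hkeys]
          intro hmem
          rw [(PySem.Dict.contains_iff_mem_keys d e.2.2).mpr hmem] at hctnf
          cases hctnf
        have hget : d.get? e.2.2 = none :=
          (PySem.Dict.get?_eq_none_iff_contains d e.2.2).mpr hctnf
        by_cases hPseen : e.2.2 ∈ seen
        · -- seen before but rejected: the cap must already be full; everything skips
          have hnlt : ¬ ((order.length : Int) < mt) := by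
            intro hlt
            exact hPnoto (hcap hlt _ hPseen)
          have hst : pvProcEv ex mt (order, d) e = (order, d) := by
            simp only [pvProcEv, pvProc, if_neg hPex, hget]
            rw [if_pos (by omega : (d.size : Int) ≥ mt)]
          have hpk : pvPick ex mt (order, seen) e = (order, seen) := by
            simp [pvPick, hPseen]
          rw [hst, hpk]
          obtain ⟨t, ht, _, htp⟩ := pvPick_shape ex mt es order seen
          have hPnot : e.2.2 ∉ (es.foldl (pvPick ex mt) (order, seen)).1 := by
            rw [ht]
            intro hmem
            rcases List.mem_append.mp hmem with h | h
            · exact hPnoto h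
            · exact (htp _ h).2 hPseen
          rw [show pvCollectL ((es.foldl (pvPick ex mt) (order, seen)).1)
                (pvInits (((es.foldl (pvPick ex mt) (order, seen)).1).drop order.length) d) e
              = pvInits (((es.foldl (pvPick ex mt) (order, seen)).1).drop order.length) d by
            simp [pvCollectL, hPnot]]
          exact ih order seen d hkeys hnodup hos hsx hcap
        · by_cases hlt : ((order.length : Int) < mt)
          · -- a fresh pmid below the cap: accepted by both
            have hst : pvProcEv ex mt (order, d) e
                = (order ++ [e.2.2], d.insert e.2.2 (PySem.Set.add PySem.Set.empty e.2.1)) := by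
              simp only [pvProcEv, pvProc, if_neg hPex, hget]
              rw [if_neg (by omega : ¬ ((d.size : Int) ≥ mt))]
            have hpk : pvPick ex mt (order, seen) e
                = (order ++ [e.2.2], PySem.Set.add seen e.2.2) := by
              simp only [pvPick,
                if_neg (fun h => h.elim hPex hPseen : ¬ (e.2.2 ∈ ex ∨ e.2.2 ∈ seen))]
              rw [if_pos hlt]
            rw [hst, hpk]
            obtain ⟨t, ht, htn, htp⟩ := pvPick_shape ex mt es (order ++ [e.2.2])
              (PySem.Set.add seen e.2.2)
            have htfresh : ∀ p ∈ t, p ∉ seen ∧ p ≠ e.2.2 := by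
              intro p hp
              have h2 := (htp p hp).2
              rw [PySem.Set.mem_add] at h2
              exact ⟨fun hm => h2 (Or.inl hm), fun hm => h2 (Or.inr hm)⟩
            have htnoto : ∀ p ∈ t, p ∉ order := fun p hp hmem =>
              (htfresh p hp).1 (hos p hmem)
            have hordF : (es.foldl (pvPick ex mt) (order ++ [e.2.2], PySem.Set.add seen e.2.2)).1
                = order ++ e.2.2 :: t := by
              rw [ht, List.append_assoc]
              rfl
            have hdrop : ((es.foldl (pvPick ex mt)
                  (order ++ [e.2.2], PySem.Set.add seen e.2.2)).1).drop order.length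
                = e.2.2 :: t := by
              rw [hordF, List.drop_left]
            have hfresh : ∀ p ∈ e.2.2 :: t, d.contains p = false := by
              intro p hp
              cases hcp : d.contains p
              · rfl
              · have hmem : p ∈ order := by
                  have := (PySem.Dict.contains_iff_mem_keys d p).mp hcp
                  rwa [hkeys] at this
                rcases List.mem_cons.mp hp with rfl | hp'
                · exact absurd hmem hPnoto
                · exact absurd hmem (htnoto p hp')
            have hndPt : (e.2.2 :: t).Nodup := by
              rw [List.nodup_cons]
              exact ⟨fun hmem => (htfresh _ hmem).2 rfl, htn⟩
            have hitems : (pvInits (e.2.2 :: t) d).items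
                = d.items ++ (e.2.2, PySem.Set.empty) :: t.map (fun p => (p, PySem.Set.empty)) := by
              simpa [pvInits] using PySem.Dict.items_foldl_insert_fresh (e.2.2 :: t) (fun p => p)
                (fun _ => PySem.Set.empty) d hfresh (by simpa using hndPt)
            have hkeys0 : (pvInits (e.2.2 :: t) d).keys = order ++ e.2.2 :: t := by
              simp only [PySem.Dict.keys, hitems, List.map_append, List.map_cons, List.map_map]
              rw [show List.map (fun x => x.1) d.items = d.keys from rfl, hkeys]
              simp [Function.comp_def]
            have hkeys0nd : (pvInits (e.2.2 :: t) d).keys.Nodup := by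
              rw [hkeys0, List.nodup_append]
              refine ⟨hnodup, hndPt, fun a ha b hb hab => ?_⟩
              rcases List.mem_cons.mp hb with rfl | hb'
              · exact hPnoto (hab ▸ ha)
              · exact htnoto b hb' (hab ▸ ha)
            have hgetD : (pvInits (e.2.2 :: t) d).getD e.2.2 PySem.Set.empty
                = PySem.Set.empty := by
              refine PySem.Dict.getD_of_mem_items _ ?_ hkeys0nd _
              rw [hitems]
              simp
            have hPmem : e.2.2 ∈ order ++ e.2.2 :: t := by simp
            have hcontains0 : (pvInits (e.2.2 :: t) d).contains e.2.2 = true := by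
              rw [PySem.Dict.contains_iff_mem_keys, hkeys0]
              exact hPmem
            have hcollect : pvCollectL (order ++ e.2.2 :: t) (pvInits (e.2.2 :: t) d) e
                = pvInits t (d.insert e.2.2 (PySem.Set.add PySem.Set.empty e.2.1)) := by
              simp only [pvCollectL, if_pos hPmem, hgetD]
              apply PySem.Dict.ext
              rw [PySem.Dict.items_insert_of_contains _ _ hcontains0, hitems]
              have hfresh' : ∀ p ∈ t,
                  (d.insert e.2.2 (PySem.Set.add PySem.Set.empty e.2.1)).contains p = false := by
                intro p hp
                rw [PySem.Dict.contains_insert]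
                have h1 : (p == e.2.2) = false := by
                  rw [beq_eq_false_iff_ne]; exact (htfresh p hp).2
                rw [h1, hfresh p (List.mem_cons_of_mem _ hp)]
                rfl
              have hins := PySem.Dict.items_foldl_insert_fresh t (fun p => p)
                (fun _ => PySem.Set.empty)
                (d.insert e.2.2 (PySem.Set.add PySem.Set.empty e.2.1)) hfresh' (by simpa using htn)
              simp only [pvInits]
              rw [hins, PySem.Dict.items_insert_of_not_contains _ _ hctnf]
              rw [List.map_append, List.map_cons]
              have hmap1 : (d.items.map
                    (fun q => if (q.1 == e.2.2) = true
                      then (e.2.2, PySem.Set.add PySem.Set.empty e.2.1) else q))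
                  = d.items := by
                have hptw : ∀ q ∈ d.items,
                    (if (q.1 == e.2.2) = true
                      then ((e.2.2, PySem.Set.add PySem.Set.empty e.2.1) : String × PySem.Set String)
                      else q) = q := by
                  intro q hq
                  have hq1 : q.1 ∈ order := by
                    rw [← hkeys]
                    exact List.mem_map.mpr ⟨q, hq, rfl⟩
                  have hnp : q.1 ≠ e.2.2 := fun h => hPnoto (h ▸ hq1)
                  simp [hnp]
                rw [List.map_congr_left hptw, List.map_id']
              have hmap2 : (t.map (fun p => (p, PySem.Set.empty))).map
                    (fun q => if (q.1 == e.2.2) = true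
                      then (e.2.2, PySem.Set.add PySem.Set.empty e.2.1) else q)
                  = t.map (fun p => (p, PySem.Set.empty)) := by
                rw [List.map_map]
                apply List.map_congr_left
                intro p hp
                have hnp : p ≠ e.2.2 := (htfresh p hp).2
                simp [hnp]
              rw [hmap1, hmap2]
              simp
            have hdrop2 : (order ++ e.2.2 :: t).drop order.length = e.2.2 :: t :=
              List.drop_left
            rw [hordF, hdrop2, hcollect]
            have hkeys' : (d.insert e.2.2 (PySem.Set.add PySem.Set.empty e.2.1)).keys
                = order ++ [e.2.2] := by
              rw [PySem.Dict.keys_insert_of_not_contains _ _ hctnf, hkeys]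
            have hnodup' : (order ++ [e.2.2]).Nodup := by
              rw [List.nodup_append]
              exact ⟨hnodup, List.nodup_singleton _,
                fun a ha b hb hab => hPnoto ((List.mem_singleton.mp hb) ▸ hab ▸ ha)⟩
            have hos' : ∀ p ∈ order ++ [e.2.2], p ∈ PySem.Set.add seen e.2.2 := by
              intro p hp
              rw [PySem.Set.mem_add]
              rcases List.mem_append.mp hp with h | h
              · exact Or.inl (hos p h)
              · exact Or.inr (List.mem_singleton.mp h)
            have hsx' : ∀ p ∈ PySem.Set.add seen e.2.2, p ∉ ex := by
              intro p hp
              rcases (PySem.Set.mem_add seen e.2.2 p).mp hp with h | rfl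
              · exact hsx p h
              · exact hPex
            have hcap' : (((order ++ [e.2.2]).length : Int) < mt) →
                ∀ p ∈ PySem.Set.add seen e.2.2, p ∈ order ++ [e.2.2] := by
              intro hlt' p hp
              rcases (PySem.Set.mem_add seen e.2.2 p).mp hp with h | rfl
              · have hlt'' : ((order.length : Int) < mt) := by
                  simp only [List.length_append, List.length_singleton] at hlt'
                  push_cast at hlt' ⊢
                  omega
                exact List.mem_append_left _ (hcap hlt'' p h)
              · exact List.mem_append_right _ (List.mem_singleton.mpr rfl)
            rw [ih (order ++ [e.2.2]) (PySem.Set.add seen e.2.2)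
              (d.insert e.2.2 (PySem.Set.add PySem.Set.empty e.2.1))
              hkeys' hnodup' hos' hsx' hcap', hordF]
            rw [show (order ++ e.2.2 :: t).drop (order ++ [e.2.2]).length = t by
              rw [show order ++ e.2.2 :: t = (order ++ [e.2.2]) ++ t by simp, List.drop_left]]
          · -- a fresh pmid with the cap already reached: both reject it
            have hst : pvProcEv ex mt (order, d) e = (order, d) := by
              simp only [pvProcEv, pvProc, if_neg hPex, hget]
              rw [if_pos (by omega : (d.size : Int) ≥ mt)]
            have hpk : pvPick ex mt (order, seen) e = (order, PySem.Set.add seen e.2.2) := by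
              simp only [pvPick,
                if_neg (fun h => h.elim hPex hPseen : ¬ (e.2.2 ∈ ex ∨ e.2.2 ∈ seen))]
              rw [if_neg hlt]
            rw [hst, hpk]
            obtain ⟨t, ht, _, htp⟩ := pvPick_shape ex mt es order (PySem.Set.add seen e.2.2)
            have hPnot : e.2.2 ∉ (es.foldl (pvPick ex mt) (order, PySem.Set.add seen e.2.2)).1 := by
              rw [ht]
              intro hmem
              rcases List.mem_append.mp hmem with h | h
              · exact hPnoto h
              · exact (htp _ h).2 ((PySem.Set.mem_add seen e.2.2 e.2.2).mpr (Or.inr rfl))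
            rw [show pvCollectL ((es.foldl (pvPick ex mt) (order, PySem.Set.add seen e.2.2)).1)
                  (pvInits (((es.foldl (pvPick ex mt) (order, PySem.Set.add seen e.2.2)).1).drop
                    order.length) d) e
                = pvInits (((es.foldl (pvPick ex mt) (order, PySem.Set.add seen e.2.2)).1).drop
                    order.length) d by
              simp [pvCollectL, hPnot]]
            have hos' : ∀ p ∈ order, p ∈ PySem.Set.add seen e.2.2 := by
              intro p hp
              rw [PySem.Set.mem_add]
              exact Or.inl (hos p hp)
            have hsx' : ∀ p ∈ PySem.Set.add seen e.2.2, p ∉ ex := by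
              intro p hp
              rcases (PySem.Set.mem_add seen e.2.2 p).mp hp with h | rfl
              · exact hsx p h
              · exact hPex
            exact ih order (PySem.Set.add seen e.2.2) d hkeys hnodup hos' hsx'
              (fun hlt' => absurd hlt' hlt)

-- Set.contains on set(order) is list membership
theorem pvCollect_eq_collectL (o : List String)
    (d : PySem.Dict String (PySem.Set String)) (e : Int × String × String) :
    pvCollect (PySem.Set.ofList o) d e = pvCollectL o d e := by
  by_cases h : e.2.2 ∈ o
  · have hb : PySem.Set.contains (PySem.Set.ofList o) e.2.2 = true := by
      simp [PySem.Set.contains, PySem.Set.mem_ofList, h]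
    simp [pvCollect, pvCollectL, h]
  · have hb : PySem.Set.contains (PySem.Set.ofList o) e.2.2 = false := by
      simp [PySem.Set.contains, PySem.Set.mem_ofList, h]
    simp [pvCollect, pvCollectL, h]

-- B, normalised: its pass-2 fold with membership in the accepted list
theorem pvAlt_eq (pc : List (String × List String)) (ex : List String) (mt : Int) :
    round_robin_dedup_py_alt pc ex mt
      = (((pvEvents pc).foldl (pvPick ex mt) ([], PySem.Set.empty)).1,
         ((pvEvents pc).foldl
            (pvCollectL (((pvEvents pc).foldl (pvPick ex mt) ([], PySem.Set.empty)).1))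
            (pvInits (((pvEvents pc).foldl (pvPick ex mt) ([], PySem.Set.empty)).1)
              PySem.Dict.empty)).items) := by
  simp only [round_robin_dedup_py_alt]
  have hcg : (pvEvents pc).foldl
        (pvCollect (PySem.Set.ofList (((pvEvents pc).foldl (pvPick ex mt) ([], PySem.Set.empty)).1)))
        (pvInits (((pvEvents pc).foldl (pvPick ex mt) ([], PySem.Set.empty)).1) PySem.Dict.empty)
      = (pvEvents pc).foldl
        (pvCollectL (((pvEvents pc).foldl (pvPick ex mt) ([], PySem.Set.empty)).1))
        (pvInits (((pvEvents pc).foldl (pvPick ex mt) ([], PySem.Set.empty)).1) PySem.Dict.empty) := by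
    apply PySem.List.foldl_congr_mem
    intro acc e _
    exact pvCollect_eq_collectL _ acc e
  rw [show ((((pvEvents pc).foldl (pvPick ex mt) ([], PySem.Set.empty)).1).foldl
        (fun d p => d.insert p PySem.Set.empty) PySem.Dict.empty)
      = pvInits (((pvEvents pc).foldl (pvPick ex mt) ([], PySem.Set.empty)).1) PySem.Dict.empty
      from rfl]
  rw [hcg]

-- ===== VERDICT (by name: the statement is the Claim_ definition above) =====
theorem round_robin_dedup_py_spec : Claim_equal_round_robin_dedup_py := by
  intro pc ex mt _
  show round_robin_dedup_py pc ex mt = round_robin_dedup_py_alt pc ex mt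
  rw [pvA_eq, pvAlt_eq]
  rw [pvMain ex mt (pvEvents pc) [] PySem.Set.empty PySem.Dict.empty rfl List.nodup_nil
    (by simp) (by simp [PySem.Set.empty]) (by simp)]
  simp [List.drop_zero]
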